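-- pv_equiv track=rewrite | github.com/bartekdylewski/adventofcode | src/day19_2.py | part1
-- ===== SOURCE A (Python) =====
-- import functools
--
-- def part1(inp: str):
--     patterns_part, designs_part = inp.split("\n\n")
--     patterns = {pattern.strip() for pattern in patterns_part.split(",")}
--     designs = designs_part.splitlines()
--
--     @functools.cache
--     def is_possble(design: str):
--         if len(design) == 0:
--             return True
--         if design in patterns:
--             return True
--         for i in range(1, min(4, len(design))):
--             if is_possble(design[:i]) and is_possble(design[i:]):
--                 return True
--         return False
--
--     possible = [design for design in designs if is_possble(design)]
--     return len(possible)
-- ===== SOURCE B (Python) =====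
-- def part1(inp: str):
--     patterns_part, designs_part = inp.split("\n\n")
--     patterns = {pattern.strip() for pattern in patterns_part.split(",")}
--
--     short_memo = {}
--
--     def shortposs(t: str) -> bool:
--         # only ever called with len(t) <= 3
--         if t in short_memo:
--             return short_memo[t]
--         r = t == "" or t in patterns or any(
--             shortposs(t[:L]) and shortposs(t[L:]) for L in range(1, len(t)))
--         short_memo[t] = r
--         return r
--
--     def composable(design: str) -> bool:
--         n = len(design)
--         dp = [False] * (n + 1)
--         dp[n] = True
--         for i in range(n - 1, -1, -1):
--             dp[i] = design[i:] in patterns or any(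
--                 shortposs(design[i:i + L]) and dp[i + L]
--                 for L in range(1, min(4, n - i)))
--         return dp[0]
--
--     return sum(1 for design in designs_part.splitlines() if composable(design))
-- ===== Notes on version B (the rewrite author's own statement) =====
-- stated objective: alternative
-- what changed: Replaces A's memoized top-down recursion is_possble with an explicit bottom-up suffix DP array (dp[i] for each suffix, filled from the end) plus a small memoized helper for the length-<=3 prefix pieces.
import Mathlib
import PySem

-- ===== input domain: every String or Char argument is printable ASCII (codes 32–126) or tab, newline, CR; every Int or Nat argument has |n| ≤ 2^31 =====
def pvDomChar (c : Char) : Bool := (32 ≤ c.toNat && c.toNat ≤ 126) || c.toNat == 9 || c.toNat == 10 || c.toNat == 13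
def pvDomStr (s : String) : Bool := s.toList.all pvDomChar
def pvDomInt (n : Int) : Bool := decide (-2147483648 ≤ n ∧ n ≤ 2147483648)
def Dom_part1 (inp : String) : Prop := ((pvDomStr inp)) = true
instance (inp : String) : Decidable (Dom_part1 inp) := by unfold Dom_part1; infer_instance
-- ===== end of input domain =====

-- B replaces A's memoized top-down recursion by an explicit bottom-up suffix DP
-- (with a small memoized helper for the length-≤3 prefix pieces); objective: alternative.

-- ===== PORT A =====
-- A's `is_possble(design)`: strings are carried as `List Char`; the `@functools.cache`
-- memoization does not change the computed value, so the port is the plain recursion.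
-- `fuel` (always called with fuel = length, which every recursive call preserves) only
-- makes the recursion structural; `range(1, min(4, len(design)))` enumerates
-- 1 .. min(4,len)-1, i.e. `List.range' 1 (min 3 (len-1))`.
def isPossibleA (patterns : List (List Char)) (fuel : Nat) (d : List Char) : Bool :=
  match fuel with
  | 0 => true  -- only reachable with d = [] (Python: len(design) == 0 → True)
  | f + 1 =>
    if d.isEmpty then true
    else if patterns.contains d then true
    else (List.range' 1 (min 3 (d.length - 1))).any fun i =>
      isPossibleA patterns f (d.take i) && isPossibleA patterns f (d.drop i)

def part1 (inp : String) : Int :=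
  -- `inp.split("\n\n")` with unpacking into exactly two parts (ValueError otherwise → Pre_):
  match PySem.Chars.splitOn inp.toList "\n\n".toList with
  | [patternsPart, designsPart] =>
    let patterns : List (List Char) :=
      PySem.Set.ofList ((PySem.Chars.splitOn patternsPart ",".toList).map PySem.Chars.strip)
    let designs : List (List Char) := PySem.Chars.splitlines designsPart
    (((designs.filter (fun d => isPossibleA patterns d.length d)).length : Nat) : Int)
  | _ => 0  -- unreachable under Pre_part1 (Python raises ValueError)

-- ===== PORT B =====
-- B's `shortposs(t)` (only ever reached with |t| ≤ 3); `range(1, len(t))` is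
-- `List.range' 1 (len-1)`; fuel = length again only makes the recursion structural.
def shortposs (patterns : List (List Char)) (fuel : Nat) (t : List Char) : Bool :=
  match fuel with
  | 0 => t.isEmpty  -- only reachable with t = [] (B: t == "" → True)
  | f + 1 =>
    t.isEmpty || patterns.contains t ||
      (List.range' 1 (t.length - 1)).any fun L =>
        shortposs patterns f (t.take L) && shortposs patterns f (t.drop L)

-- B's dp array, built from i = n-1 down to 0: `dpListB patterns s` is the list
-- [dp[i], dp[i+1], …, dp[n]] for the suffix s = design[i:]; prepending one cell per
-- step is exactly the downward loop, and dp[i+L] is element L-1 of the previous list.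
def dpListB (patterns : List (List Char)) : List Char → List Bool
  | [] => [true]
  | c :: rest =>
    let dp := dpListB patterns rest
    (patterns.contains (c :: rest) ||
      (List.range' 1 (min 3 rest.length)).any fun L =>
        shortposs patterns L ((c :: rest).take L) && dp.getD (L - 1) false) :: dp

def part1_alt (inp : String) : Int :=
  match PySem.Chars.splitOn inp.toList "\n\n".toList with
  | [] => 0          -- unreachable under Pre_part1
  | [_] => 0         -- unreachable under Pre_part1
  | patternsPart :: designsPart :: rest =>
    match rest with
    | _ :: _ => 0    -- unreachable under Pre_part1
    | [] =>
      let patterns : List (List Char) :=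
        PySem.Set.ofList ((PySem.Chars.splitOn patternsPart ",".toList).map PySem.Chars.strip)
      let designs : List (List Char) := PySem.Chars.splitlines designsPart
      -- sum(1 for design in designs if composable(design)), composable(d) = dp[0]
      ((designs.countP (fun d => (dpListB patterns d).getD 0 false) : Nat) : Int)

-- ===== PRECONDITION & SPEC =====
-- A unpacks inp.split("\n\n") into exactly two names and raises ValueError otherwise,
-- so Pre_ admits exactly the inputs containing exactly one "\n\n" separator.
def Pre_part1 (inp : String) : Prop :=
  (PySem.Chars.splitOn inp.toList "\n\n".toList).length = 2
instance (inp : String) : Decidable (Pre_part1 inp) := by unfold Pre_part1; infer_instance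

def pvWitness_part1 : String := "r, wr, b, g, bwu\n\nbrwrr\nbggr\nubwu"

def Spec_part1 (inp : String) (out : Int) : Prop := out = part1_alt inp
instance (inp : String) (out : Int) : Decidable (Spec_part1 inp out) := by unfold Spec_part1; infer_instance

-- ===== CLAIM (what is proved, stated in full; the proofs are below) =====
def Claim_equal_part1 : Prop := ∀ (inp : String), Dom_part1 inp → Pre_part1 inp → Spec_part1 inp (part1 inp)

-- ===== LEMMAS AND PROOFS =====

-- membership-aware congruence for List.any (the library lemma quantifies over all a)
theorem pv_any_congr_mem {α : Type} {l : List α} {p q : α → Bool}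
    (h : ∀ x ∈ l, p x = q x) : l.any p = l.any q := by
  induction l with
  | nil => rfl
  | cons a t ih =>
    simp only [List.any_cons, h a (by simp), ih (fun x hx => h x (by simp [hx]))]

-- any amount of fuel covering the length computes A's recursion
theorem isPossibleA_fuel (p : List (List Char)) :
    ∀ (f f' : Nat) (d : List Char), d.length ≤ f → d.length ≤ f' →
      isPossibleA p f d = isPossibleA p f' d := by
  intro f
  induction f with
  | zero =>
    intro f' d hf _
    have : d = [] := List.eq_nil_of_length_eq_zero (Nat.le_zero.mp hf)
    subst this
    cases f' <;> simp [isPossibleA]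
  | succ f ih =>
    intro f' d hf hf'
    cases f' with
    | zero =>
      have : d = [] := List.eq_nil_of_length_eq_zero (Nat.le_zero.mp hf')
      subst this
      simp [isPossibleA]
    | succ g =>
      simp only [isPossibleA]
      by_cases he : d.isEmpty = true
      · simp [he]
      · have hd : d ≠ [] := by simpa using he
        have hlen : 0 < d.length := List.length_pos_iff.mpr hd
        simp only [he]
        cases hp : p.contains d with
        | true => simp
        | false =>
        simp only [Bool.false_eq_true, if_false]
        apply pv_any_congr_mem
        intro i hi
        have hb := List.mem_range'_1.mp hi
        have h1 : (d.take i).length ≤ f := by simp [List.length_take]; omega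
        have h2 : (d.take i).length ≤ g := by simp [List.length_take]; omega
        have h3 : (d.drop i).length ≤ f := by simp [List.length_drop]; omega
        have h4 : (d.drop i).length ≤ g := by simp [List.length_drop]; omega
        rw [ih _ _ h1 h2, ih _ _ h3 h4]

-- any amount of fuel covering the length computes B's short helper
theorem shortposs_fuel (p : List (List Char)) :
    ∀ (f f' : Nat) (t : List Char), t.length ≤ f → t.length ≤ f' →
      shortposs p f t = shortposs p f' t := by
  intro f
  induction f with
  | zero =>
    intro f' t hf _
    have : t = [] := List.eq_nil_of_length_eq_zero (Nat.le_zero.mp hf)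
    subst this
    cases f' <;> simp [shortposs]
  | succ f ih =>
    intro f' t hf hf'
    cases f' with
    | zero =>
      have : t = [] := List.eq_nil_of_length_eq_zero (Nat.le_zero.mp hf')
      subst this
      simp [shortposs]
    | succ g =>
      simp only [shortposs]
      congr 1
      apply pv_any_congr_mem
      intro L hL
      have hb := List.mem_range'_1.mp hL
      have hlen : 0 < t.length := by omega
      have h1 : (t.take L).length ≤ f := by simp [List.length_take]; omega
      have h2 : (t.take L).length ≤ g := by simp [List.length_take]; omega
      have h3 : (t.drop L).length ≤ f := by simp [List.length_drop]; omega
      have h4 : (t.drop L).length ≤ g := by simp [List.length_drop]; omega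
      rw [ih _ _ h1 h2, ih _ _ h3 h4]

-- B's short helper agrees with A's recursion on the short strings it is called on.
theorem shortposs_eq (p : List (List Char)) :
    ∀ (n : Nat) (t : List Char), t.length ≤ n → t.length ≤ 3 →
      shortposs p t.length t = isPossibleA p t.length t := by
  intro n
  induction n with
  | zero =>
    intro t ht _
    have : t = [] := List.eq_nil_of_length_eq_zero (Nat.le_zero.mp ht)
    subst this
    simp [shortposs, isPossibleA]
  | succ n ih =>
    intro t ht h3
    cases t with
    | nil => simp [shortposs, isPossibleA]
    | cons c cs =>
      simp only [shortposs, isPossibleA, List.length_cons, Nat.add_sub_cancel,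
        List.isEmpty_cons, Bool.false_or]
      have hcs : cs.length ≤ 2 := by
        simp only [List.length_cons] at h3; omega
      have hn : cs.length ≤ n := by
        simp only [List.length_cons] at ht; omega
      have hmin : min 3 cs.length = cs.length := by omega
      rw [hmin]
      have key : ∀ (x : List Char), x.length ≤ n → x.length ≤ 3 → x.length ≤ cs.length →
          shortposs p cs.length x = isPossibleA p cs.length x := by
        intro x h1 h2 h3x
        rw [shortposs_fuel p cs.length x.length x h3x (le_refl _), ih x h1 h2,
          isPossibleA_fuel p x.length cs.length x (le_refl _) h3x]
      cases hp : p.contains (c :: cs) with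
      | true => simp
      | false =>
        simp only [Bool.false_eq_true, if_false, Bool.false_or]
        apply pv_any_congr_mem
        intro L hL
        have hb := List.mem_range'_1.mp hL
        have htk : ((c :: cs).take L).length = L := by
          simp [List.length_take]; omega
        have hdr : ((c :: cs).drop L).length = cs.length + 1 - L := by
          simp [List.length_drop]
        rw [key ((c :: cs).take L) (by rw [htk]; omega) (by rw [htk]; omega) (by rw [htk]; omega),
          key ((c :: cs).drop L) (by rw [hdr]; omega) (by rw [hdr]; omega) (by rw [hdr]; omega)]

-- The dp cell at offset i is A's possibility predicate of the corresponding suffix.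
theorem dpListB_getD (p : List (List Char)) (d : List Char) :
    ∀ (i : Nat), i ≤ d.length →
      (dpListB p d).getD i false = isPossibleA p (d.drop i).length (d.drop i) := by
  induction d with
  | nil =>
    intro i hi
    have : i = 0 := Nat.le_zero.mp hi
    subst this
    simp [dpListB, isPossibleA]
  | cons c rest ih =>
    intro i hi
    cases i with
    | succ j =>
      have hj : j ≤ rest.length := by simpa using hi
      simpa [dpListB] using ih j hj
    | zero =>
      simp only [dpListB, List.drop_zero, List.getD_cons_zero, List.length_cons]
      rw [show isPossibleA p (rest.length + 1) (c :: rest)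
          = (if (c :: rest).isEmpty then true
            else if p.contains (c :: rest) then true
            else (List.range' 1 (min 3 ((c :: rest).length - 1))).any fun L =>
              isPossibleA p rest.length ((c :: rest).take L)
                && isPossibleA p rest.length ((c :: rest).drop L)) from rfl]
      simp only [List.isEmpty_cons, List.length_cons, Nat.add_sub_cancel]
      cases hp : p.contains (c :: rest) with
      | true => simp
      | false =>
        simp only [Bool.false_eq_true, if_false, Bool.false_or]
        apply pv_any_congr_mem
        intro L hL
        have hb := List.mem_range'_1.mp hL
        have htk : ((c :: rest).take L).length = L := by
          simp [List.length_take]; omega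
        have e1 : shortposs p L ((c :: rest).take L)
            = isPossibleA p rest.length ((c :: rest).take L) := by
          rw [shortposs_fuel p L ((c :: rest).take L).length _ (by rw [htk]) (le_refl _),
            shortposs_eq p 3 ((c :: rest).take L) (by rw [htk]; omega) (by rw [htk]; omega),
            isPossibleA_fuel p ((c :: rest).take L).length rest.length _ (le_refl _)
              (by rw [htk]; omega)]
        have e2 : (dpListB p rest).getD (L - 1) false
            = isPossibleA p rest.length ((c :: rest).drop L) := by
          obtain ⟨m, rfl⟩ : ∃ m, L = m + 1 := ⟨L - 1, by omega⟩
          have hm : m ≤ rest.length := by omega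
          simp only [Nat.add_sub_cancel]
          rw [ih m hm, List.drop_succ_cons,
            isPossibleA_fuel p (rest.drop m).length rest.length _ (by omega)
              (by simp [List.length_drop])]
        rw [e1, e2]
      
-- dp[0] is A's predicate (with its own fuel) on the whole design.
theorem dpListB_head (p : List (List Char)) (d : List Char) :
    (dpListB p d).getD 0 false = isPossibleA p d.length d := by
  simpa using dpListB_getD p d 0 (Nat.zero_le _)

-- ===== VERDICT (by name: the statement is the Claim_ definition above) =====
theorem part1_spec : Claim_equal_part1 := by
  intro inp _ _
  unfold Spec_part1 part1 part1_alt
  cases h : PySem.Chars.splitOn inp.toList "\n\n".toList with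
  | nil => rfl
  | cons a t =>
    cases t with
    | nil => rfl
    | cons b t2 =>
      cases t2 with
      | cons x t3 => rfl
      | nil =>
        simp only []
        rw [← List.countP_eq_length_filter]
        congr 1
        apply List.countP_congr
        intro d _
        rw [dpListB_head]
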